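-- pv_equiv track=rewrite | github.com/SilverStarn/PHI-Guard-Intelligence | apps/api/app/services/intelligence_service.py | _owner_for_controls
-- ===== SOURCE A (Python) =====
-- def _owner_for_controls(controls: list[str]) -> str:
--     normalized = [control.casefold() for control in controls]
--     if any("ai governance" in control for control in normalized):
--         return "ai-platform"
--     if any("audit controls" in control for control in normalized):
--         return "security-logging"
--     if any("access control" in control or "unique user identification" in control for control in normalized):
--         return "security-engineering"
--     if any("de-identification" in control or "minimum necessary" in control for control in normalized):
--         return "data-governance"
--     return "privacy-office"
-- ===== SOURCE B (Python) =====
-- _RULES = [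
--     (("ai governance",), "ai-platform"),
--     (("audit controls",), "security-logging"),
--     (("access control", "unique user identification"), "security-engineering"),
--     (("de-identification", "minimum necessary"), "data-governance"),
-- ]
--
--
-- def _rule_index(control):
--     for i, (subs, _team) in enumerate(_RULES):
--         if any(sub in control for sub in subs):
--             return i
--     return len(_RULES)
--
--
-- def _owner_for_controls(controls: list[str]) -> str:
--     best = len(_RULES)
--     for control in controls:
--         best = min(best, _rule_index(control.casefold()))
--     return _RULES[best][1] if best < len(_RULES) else "privacy-office"
-- ===== Notes on version B (the rewrite author's own statement) =====
-- stated objective: alternative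
-- what changed: Replaced A's four sequential any-scans over the control list by a priority-ordered rule table and a single pass that keeps the minimum matching rule index per control, then indexes the table once.
import Mathlib
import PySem

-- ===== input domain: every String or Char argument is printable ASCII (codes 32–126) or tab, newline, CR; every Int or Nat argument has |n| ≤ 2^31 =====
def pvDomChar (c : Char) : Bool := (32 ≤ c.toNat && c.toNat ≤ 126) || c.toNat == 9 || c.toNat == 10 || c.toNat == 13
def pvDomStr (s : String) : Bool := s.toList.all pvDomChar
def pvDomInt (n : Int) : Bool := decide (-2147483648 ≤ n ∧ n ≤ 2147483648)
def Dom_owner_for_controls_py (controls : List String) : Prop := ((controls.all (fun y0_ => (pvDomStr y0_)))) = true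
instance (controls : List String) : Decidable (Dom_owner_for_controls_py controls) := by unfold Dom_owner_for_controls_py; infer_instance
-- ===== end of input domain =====

-- B replaces A's four sequential `any` scans by a priority rule table and a single pass
-- keeping the minimum matching rule index (objective: alternative decomposition, same cost).
-- casefold = lower, exact on the ASCII domain.

-- ===== PORT A =====
def owner_for_controls_py (controls : List String) : String :=
  let normalized := controls.map PySem.Str.lower
  if normalized.any (fun control => PySem.Str.isIn "ai governance" control) then "ai-platform"
  else if normalized.any (fun control => PySem.Str.isIn "audit controls" control) then "security-logging"
  else if normalized.any (fun control => PySem.Str.isIn "access control" control || PySem.Str.isIn "unique user identification" control) then "security-engineering"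
  else if normalized.any (fun control => PySem.Str.isIn "de-identification" control || PySem.Str.isIn "minimum necessary" control) then "data-governance"
  else "privacy-office"

-- ===== PORT B =====
def pvRules : List (List String × String) :=
  [(["ai governance"], "ai-platform"),
   (["audit controls"], "security-logging"),
   (["access control", "unique user identification"], "security-engineering"),
   (["de-identification", "minimum necessary"], "data-governance")]

def pvRuleIndex (control : String) : Nat :=
  match pvRules.findIdx? (fun r => r.1.any (fun sub => PySem.Str.isIn sub control)) with
  | some i => i
  | none => pvRules.length

def owner_for_controls_py_alt (controls : List String) : String :=
  let best := controls.foldl (fun b control => min b (pvRuleIndex (PySem.Str.lower control))) pvRules.length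
  match pvRules[best]? with
  | some r => r.2
  | none => "privacy-office"

-- ===== PRECONDITION & SPEC =====
def Spec_owner_for_controls_py (controls : List String) (out : String) : Prop := out = owner_for_controls_py_alt controls
instance (controls : List String) (out : String) : Decidable (Spec_owner_for_controls_py controls out) := by unfold Spec_owner_for_controls_py; infer_instance

-- ===== CLAIM (what is proved, stated in full; the proofs are below) =====
def Claim_equal_owner_for_controls_py : Prop := ∀ (controls : List String), Dom_owner_for_controls_py controls → Spec_owner_for_controls_py controls (owner_for_controls_py controls)

-- ===== LEMMAS AND PROOFS =====

lemma ruleIndex_eq (c : String) : pvRuleIndex c =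
    if PySem.Str.isIn "ai governance" c = true then 0
    else if PySem.Str.isIn "audit controls" c = true then 1
    else if (PySem.Str.isIn "access control" c || PySem.Str.isIn "unique user identification" c) = true then 2
    else if (PySem.Str.isIn "de-identification" c || PySem.Str.isIn "minimum necessary" c) = true then 3
    else 4 := by
  simp only [pvRuleIndex, pvRules, List.findIdx?_cons, List.findIdx?_nil, List.any_cons,
    List.any_nil, Bool.or_false]
  split_ifs <;> simp_all

lemma foldl_min_le_iff (f : String → Nat) (l : List String) (b n : Nat) :
    l.foldl (fun acc c => min acc (f c)) b ≤ n ↔ b ≤ n ∨ ∃ c ∈ l, f c ≤ n := by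
  induction l generalizing b with
  | nil => simp
  | cons x xs ih =>
    simp only [List.foldl_cons, ih, min_le_iff, List.mem_cons]
    constructor
    · rintro (⟨h | h⟩ | ⟨c, hc, hcn⟩)
      · exact Or.inl h
      · exact Or.inr ⟨x, Or.inl rfl, h⟩
      · exact Or.inr ⟨c, Or.inr hc, hcn⟩
    · rintro (h | ⟨c, (rfl | hc), hcn⟩)
      · exact Or.inl (Or.inl h)
      · exact Or.inl (Or.inr hcn)
      · exact Or.inr ⟨c, hc, hcn⟩

lemma le_foldl_min (f : String → Nat) (l : List String) (b n : Nat) (hb : n ≤ b)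
    (h : ∀ c ∈ l, n ≤ f c) : n ≤ l.foldl (fun acc c => min acc (f c)) b := by
  induction l generalizing b with
  | nil => exact hb
  | cons x xs ih =>
    exact ih _ (le_min hb (h x (List.mem_cons_self))) (fun c hc => h c (List.mem_cons_of_mem _ hc))

lemma alt_eq (controls : List String) : owner_for_controls_py_alt controls =
    match pvRules[(controls.foldl (fun b control => min b (pvRuleIndex (PySem.Str.lower control))) pvRules.length)]? with
    | some r => r.2
    | none => "privacy-office" := rfl

-- ===== VERDICT (by name: the statement is the Claim_ definition above) =====
theorem owner_for_controls_py_spec : Claim_equal_owner_for_controls_py := by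
  intro controls _
  unfold Spec_owner_for_controls_py
  rw [alt_eq]
  simp only [owner_for_controls_py, List.any_map, Function.comp_def]
  by_cases h0 : controls.any (fun c => PySem.Str.isIn "ai governance" (PySem.Str.lower c)) = true
  · obtain ⟨c, hc, hcc⟩ := List.any_eq_true.mp h0
    have hb : controls.foldl (fun b c => min b (pvRuleIndex (PySem.Str.lower c))) pvRules.length = 0 :=
      Nat.le_zero.mp ((foldl_min_le_iff _ _ _ _).mpr
        (Or.inr ⟨c, hc, by rw [ruleIndex_eq, if_pos hcc]⟩))
    rw [if_pos h0, hb]; rfl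
  · have h0' := List.any_eq_false.mp (Bool.not_eq_true _ ▸ h0)
    rw [if_neg h0]
    by_cases h1 : controls.any (fun c => PySem.Str.isIn "audit controls" (PySem.Str.lower c)) = true
    · obtain ⟨c, hc, hcc⟩ := List.any_eq_true.mp h1
      have hb : controls.foldl (fun b c => min b (pvRuleIndex (PySem.Str.lower c))) pvRules.length = 1 := by
        refine Nat.le_antisymm ((foldl_min_le_iff _ _ _ _).mpr (Or.inr ⟨c, hc, ?_⟩))
          (le_foldl_min _ _ _ _ (by decide) (fun c' hc' => ?_))
        · rw [ruleIndex_eq, if_neg (h0' c hc), if_pos hcc]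
        · rw [ruleIndex_eq, if_neg (h0' c' hc')]
          split_ifs <;> omega
      rw [if_pos h1, hb]; rfl
    · have h1' := List.any_eq_false.mp (Bool.not_eq_true _ ▸ h1)
      rw [if_neg h1]
      by_cases h2 : controls.any (fun c => (PySem.Str.isIn "access control" (PySem.Str.lower c) || PySem.Str.isIn "unique user identification" (PySem.Str.lower c))) = true
      · obtain ⟨c, hc, hcc⟩ := List.any_eq_true.mp h2
        have hb : controls.foldl (fun b c => min b (pvRuleIndex (PySem.Str.lower c))) pvRules.length = 2 := by
          refine Nat.le_antisymm ((foldl_min_le_iff _ _ _ _).mpr (Or.inr ⟨c, hc, ?_⟩))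
            (le_foldl_min _ _ _ _ (by decide) (fun c' hc' => ?_))
          · rw [ruleIndex_eq, if_neg (h0' c hc), if_neg (h1' c hc), if_pos hcc]
          · rw [ruleIndex_eq, if_neg (h0' c' hc'), if_neg (h1' c' hc')]
            split_ifs <;> omega
        rw [if_pos h2, hb]; rfl
      · have h2' := List.any_eq_false.mp (Bool.not_eq_true _ ▸ h2)
        rw [if_neg h2]
        by_cases h3 : controls.any (fun c => (PySem.Str.isIn "de-identification" (PySem.Str.lower c) || PySem.Str.isIn "minimum necessary" (PySem.Str.lower c))) = true
        · obtain ⟨c, hc, hcc⟩ := List.any_eq_true.mp h3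
          have hb : controls.foldl (fun b c => min b (pvRuleIndex (PySem.Str.lower c))) pvRules.length = 3 := by
            refine Nat.le_antisymm ((foldl_min_le_iff _ _ _ _).mpr (Or.inr ⟨c, hc, ?_⟩))
              (le_foldl_min _ _ _ _ (by decide) (fun c' hc' => ?_))
            · rw [ruleIndex_eq, if_neg (h0' c hc), if_neg (h1' c hc), if_neg (h2' c hc), if_pos hcc]
            · rw [ruleIndex_eq, if_neg (h0' c' hc'), if_neg (h1' c' hc'), if_neg (h2' c' hc')]
              split_ifs <;> omega
          rw [if_pos h3, hb]; rfl
        · have h3' := List.any_eq_false.mp (Bool.not_eq_true _ ▸ h3)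
          rw [if_neg h3]
          have hb : controls.foldl (fun b c => min b (pvRuleIndex (PySem.Str.lower c))) pvRules.length = 4 := by
            refine Nat.le_antisymm ((foldl_min_le_iff _ _ _ _).mpr (Or.inl (by decide)))
              (le_foldl_min _ _ _ _ (by decide) (fun c' hc' => ?_))
            rw [ruleIndex_eq, if_neg (h0' c' hc'), if_neg (h1' c' hc'), if_neg (h2' c' hc'),
              if_neg (h3' c' hc')]
          rw [hb]; rfl
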